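-- pv_equiv track=rewrite | github.com/calzateu/Electrical-vehicle-routing-problem-with-energy-consumption-model-and-steep-roads | scripts/modules/constructive3.py | __order_vehicles
-- ===== SOURCE A (Python) =====
-- def __order_vehicles(traveled_distances):
--     indexed_numbers = [(index, number) for index, number in enumerate(traveled_distances)]
--     sorted_indexed_numbers = sorted(indexed_numbers, key=lambda x: x[1])
--     sorted_numbers = [number for _, number in sorted_indexed_numbers]
--     indices = [index for index, _ in sorted_indexed_numbers]
--
--     for i in range(len(sorted_numbers)):
--         j = i + 1
--         while j < len(sorted_numbers) and sorted_numbers[j] == sorted_numbers[i]: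
--             j += 1
--         if j - i > 1:
--             indices[i:j] = sorted(indices[i:j])
--
--     return indices
-- ===== SOURCE B (Python) =====
-- def __order_vehicles(traveled_distances):
--     return sorted(range(len(traveled_distances)),
--                   key=lambda i: (traveled_distances[i], i))
-- ===== Notes on version B (the rewrite author's own statement) =====
-- stated objective: simpler
-- what changed: Replaces the value-only pair sort followed by an explicit run-detection pass that re-sorts index slices of equal-value runs with a single keyed sort of the index range using the composite key (value, index), which encodes the tie-break directly.
import Mathlib
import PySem

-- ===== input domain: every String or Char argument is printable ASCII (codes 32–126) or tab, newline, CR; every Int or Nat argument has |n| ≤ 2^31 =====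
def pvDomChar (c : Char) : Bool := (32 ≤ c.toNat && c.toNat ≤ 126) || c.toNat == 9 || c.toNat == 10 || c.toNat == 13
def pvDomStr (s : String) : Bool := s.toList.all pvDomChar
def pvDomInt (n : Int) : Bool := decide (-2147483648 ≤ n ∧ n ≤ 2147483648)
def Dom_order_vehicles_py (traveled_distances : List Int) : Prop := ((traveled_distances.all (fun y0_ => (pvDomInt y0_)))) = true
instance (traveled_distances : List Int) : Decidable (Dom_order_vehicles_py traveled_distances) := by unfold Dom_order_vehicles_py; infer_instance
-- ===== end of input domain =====

-- B folds A's tie-breaking run-fix loop into a single keyed sort by the composite key (value, index): simpler, same result.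


-- ===== PORT A =====
-- the inner 'while j < len(sorted_numbers) and sorted_numbers[j] == sorted_numbers[i]: j += 1' loop
def owFindJ (nums : List Int) (vi : Int) (j : Int) : Int :=
  if _h : j < (nums.length : Int) ∧ PySem.List.pyGetD nums j 0 = vi then owFindJ nums vi (j + 1)
  else j
termination_by ((nums.length : Int) - j).toNat
decreasing_by omega

-- one iteration of the 'for i in range(len(sorted_numbers))' body ('indices[i:j] = sorted(indices[i:j])')
def owStep (sorted_numbers : List Int) (indices : List Int) (i : Int) : List Int :=
  let j := owFindJ sorted_numbers (PySem.List.pyGetD sorted_numbers i 0) (i + 1)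
  if j - i > 1 then
    PySem.List.slice indices none (some i)
      ++ PySem.List.sorted (PySem.List.slice indices (some i) (some j)) (fun x => x) false
      ++ PySem.List.slice indices (some j) none
  else indices

def order_vehicles_py (traveled_distances : List Int) : List Int :=
  let indexed_numbers := PySem.List.enumerate traveled_distances 0
  let sorted_indexed_numbers := PySem.List.sorted indexed_numbers (fun x => x.2) false
  let sorted_numbers := sorted_indexed_numbers.map (fun p => p.2)
  let indices := sorted_indexed_numbers.map (fun p => p.1)
  (PySem.List.pyRange 0 (sorted_numbers.length : Int) 1).foldl (owStep sorted_numbers) indices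

-- ===== PORT B =====
def order_vehicles_py_alt (traveled_distances : List Int) : List Int :=
  PySem.List.sorted2 (PySem.List.pyRange 0 (traveled_distances.length : Int) 1)
    (fun i => PySem.List.pyGetD traveled_distances i 0) (fun i => i) false

-- ===== PRECONDITION & SPEC =====
def Spec_order_vehicles_py (traveled_distances : List Int) (out : List Int) : Prop := out = order_vehicles_py_alt traveled_distances
instance (traveled_distances : List Int) (out : List Int) : Decidable (Spec_order_vehicles_py traveled_distances out) := by unfold Spec_order_vehicles_py; infer_instance

-- ===== CLAIM (what is proved, stated in full; the proofs are below) =====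
def Claim_equal_order_vehicles_py : Prop := ∀ (traveled_distances : List Int), Dom_order_vehicles_py traveled_distances → Spec_order_vehicles_py traveled_distances (order_vehicles_py traveled_distances)

-- ===== LEMMAS AND PROOFS =====

-- Stability of PySem's insertion sort when the secondary key is strictly increasing along the input:
-- x is inserted after every previously inserted element with an equal primary key, so strict lex order is kept.
theorem insertBy_lex_pairwise {α : Type} (k1 k2 : α → Int) (x : α) (acc : List α)
    (hp : acc.Pairwise (fun a b => toLex (k1 a, k2 a) < toLex (k1 b, k2 b)))
    (hx : ∀ y ∈ acc, k1 y = k1 x → k2 y < k2 x) :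
    (PySem.List.insertBy (fun a b => decide (k1 a < k1 b)) x acc).Pairwise
      (fun a b => toLex (k1 a, k2 a) < toLex (k1 b, k2 b)) := by
  induction acc with
  | nil => simp [PySem.List.insertBy]
  | cons y ys ih =>
    rw [List.pairwise_cons] at hp
    obtain ⟨hy, hys⟩ := hp
    by_cases hb : k1 x < k1 y
    · rw [show PySem.List.insertBy (fun a b => decide (k1 a < k1 b)) x (y :: ys)
          = x :: y :: ys from by simp [PySem.List.insertBy, hb]]
      refine List.Pairwise.cons ?_ (List.Pairwise.cons hy hys)
      intro z hz
      rcases List.mem_cons.1 hz with rfl | hz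
      · rw [Prod.Lex.lt_iff]; left; simpa using hb
      · have := hy z hz
        rw [Prod.Lex.lt_iff] at this ⊢
        simp only [ofLex_toLex] at this ⊢
        rcases this with h | ⟨h, _⟩
        · left; omega
        · left; omega
    · rw [show PySem.List.insertBy (fun a b => decide (k1 a < k1 b)) x (y :: ys)
          = y :: PySem.List.insertBy (fun a b => decide (k1 a < k1 b)) x ys from by
            simp [PySem.List.insertBy, hb]]
      refine List.Pairwise.cons ?_ (ih hys (fun y' h' => hx y' (List.mem_cons_of_mem _ h')))
      intro z hz
      rcases (PySem.List.mem_insertBy _ _ _ _).1 hz with rfl | hz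
      · rw [Prod.Lex.lt_iff]
        simp only [ofLex_toLex]
        rcases lt_or_eq_of_le (le_of_not_gt hb) with h | h
        · left; exact h
        · right; exact ⟨h, hx y (List.mem_cons_self) (by omega)⟩
      · exact hy z hz

theorem sorted_lex_aux {α : Type} (k1 k2 : α → Int) (xs : List α) :
    ∀ acc : List α, xs.Pairwise (fun a b => k2 a < k2 b) →
    acc.Pairwise (fun a b => toLex (k1 a, k2 a) < toLex (k1 b, k2 b)) →
    (∀ y ∈ acc, ∀ z ∈ xs, k1 y = k1 z → k2 y < k2 z) →
    (xs.foldl (fun acc x => PySem.List.insertBy (fun a b => decide (k1 a < k1 b)) x acc) acc).Pairwise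
      (fun a b => toLex (k1 a, k2 a) < toLex (k1 b, k2 b)) := by
  induction xs with
  | nil => intro acc _ hp _; simpa using hp
  | cons x rest ih =>
    intro acc hxs hp hcross
    rw [List.pairwise_cons] at hxs
    obtain ⟨hxrest, hrest⟩ := hxs
    simp only [List.foldl_cons]
    refine ih _ hrest ?_ ?_
    · exact insertBy_lex_pairwise k1 k2 x acc hp
        (fun y hy h => hcross y hy x (List.mem_cons_self) h)
    · intro y hy z hz h
      rcases (PySem.List.mem_insertBy _ _ _ _).1 hy with rfl | hy
      · exact hxrest z hz
      · exact hcross y hy z (List.mem_cons_of_mem _ hz) h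

-- PySem's stable sort of a list whose secondary key strictly increases is strictly lex-sorted.
theorem sorted_lex_pairwise {α : Type} (k1 k2 : α → Int) (xs : List α)
    (hxs : xs.Pairwise (fun a b => k2 a < k2 b)) :
    (PySem.List.sorted xs k1 false).Pairwise
      (fun a b => toLex (k1 a, k2 a) < toLex (k1 b, k2 b)) := by
  rw [PySem.List.sorted_eq_foldl_insertBy]
  exact sorted_lex_aux k1 k2 xs [] hxs (by simp) (by simp)

theorem bool_lex (k1a k1b k2a k2b : Int) :
    (decide (k1a < k1b) || (!decide (k1b < k1a) && decide (k2a < k2b)))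
      = decide (toLex (k1a, k2a) < toLex (k1b, k2b)) := by
  by_cases h : toLex (k1a, k2a) < toLex (k1b, k2b)
  · rw [decide_eq_true h]
    rw [Prod.Lex.lt_iff] at h
    simp only [ofLex_toLex] at h
    by_cases h1 : k1a < k1b <;> by_cases h2 : k1b < k1a <;> by_cases h3 : k2a < k2b <;>
      simp [h1, h2, h3] <;> omega
  · rw [decide_eq_false h]
    rw [Prod.Lex.lt_iff] at h
    simp only [ofLex_toLex] at h
    by_cases h1 : k1a < k1b <;> by_cases h2 : k1b < k1a <;> by_cases h3 : k2a < k2b <;>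
      simp [h1, h2, h3] <;> omega

-- sorted2 with Int keys is the sort by the lexicographic pair key.
theorem sorted2_eq_sorted_lex {α : Type} (xs : List α) (k1 k2 : α → Int) :
    PySem.List.sorted2 xs k1 k2 false
      = PySem.List.sorted xs (fun a => toLex (k1 a, k2 a)) false := by
  rw [PySem.List.sorted_eq_foldl_insertBy]
  unfold PySem.List.sorted2
  simp only [if_neg (by decide : ¬ (false = true))]
  congr 1
  funext acc a
  congr 1
  funext b c
  exact bool_lex (k1 b) (k1 c) (k2 b) (k2 c)

-- characterization of the while loop: it stops within bounds and everything it skipped equals vi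
theorem owFindJ_spec (nums : List Int) (v : Int) (j : Int) (h1 : j ≤ (nums.length : Int)) :
    j ≤ owFindJ nums v j ∧ owFindJ nums v j ≤ (nums.length : Int) ∧
      ∀ p : Int, j ≤ p → p < owFindJ nums v j → PySem.List.pyGetD nums p 0 = v := by
  rw [owFindJ]
  split
  · rename_i h
    have ih := owFindJ_spec nums v (j + 1) (by omega)
    refine ⟨by omega, ih.2.1, ?_⟩
    intro p hp hp'
    by_cases hpj : p = j
    · subst hpj; exact h.2
    · exact ih.2.2 p (by omega) hp'
  · exact ⟨le_refl _, h1, fun p hp hp' => absurd (lt_of_le_of_lt hp hp') (lt_irrefl _)⟩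
termination_by ((nums.length : Int) - j).toNat
decreasing_by rename_i h; omega

theorem foldl_fix {α β : Type} (f : β → α → β) (b : β) (l : List α)
    (h : ∀ x ∈ l, f b x = b) : l.foldl f b = b := by
  induction l with
  | nil => rfl
  | cons x t ih =>
    simp only [List.foldl_cons, h x (List.mem_cons_self)]
    exact ih (fun y hy => h y (List.mem_cons_of_mem _ hy))

-- every element of A's sorted pair list is (k, td[k]); its value is recovered by pyGetD on its index
theorem mem_S_getD (td : List Int) (p : Int × Int)
    (hp : p ∈ PySem.List.sorted (PySem.List.enumerate td 0) (fun x => x.2) false) :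
    PySem.List.pyGetD td p.1 0 = p.2 := by
  rw [PySem.List.mem_sorted, PySem.List.mem_enumerate_iff] at hp
  obtain ⟨k, hk, rfl⟩ := hp
  simp only [zero_add]
  rw [PySem.List.pyGetD_eq_getElem td 0 (Int.natCast_nonneg k) (by exact_mod_cast hk)]
  simp

-- positional strictness: equal values in A's sorted pair list carry strictly increasing indices
theorem S_run_lt (td : List Int) (p q : Nat)
    (hp : p < (PySem.List.sorted (PySem.List.enumerate td 0) (fun x => x.2) false).length)
    (hq : q < (PySem.List.sorted (PySem.List.enumerate td 0) (fun x => x.2) false).length)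
    (hpq : p < q)
    (heq : ((PySem.List.sorted (PySem.List.enumerate td 0) (fun x => x.2) false)[p]'hp).2
         = ((PySem.List.sorted (PySem.List.enumerate td 0) (fun x => x.2) false)[q]'hq).2) :
    ((PySem.List.sorted (PySem.List.enumerate td 0) (fun x => x.2) false)[p]'hp).1
      < ((PySem.List.sorted (PySem.List.enumerate td 0) (fun x => x.2) false)[q]'hq).1 := by
  have hlex := sorted_lex_pairwise (fun p : Int × Int => p.2) (fun p => p.1)
      (PySem.List.enumerate td 0) (PySem.List.pairwise_lt_enumerate td 0)
  rw [List.pairwise_iff_getElem] at hlex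
  have h := hlex p q hp hq hpq
  rw [Prod.Lex.lt_iff] at h
  simp only [ofLex_toLex] at h
  rcases h with h | ⟨_, h⟩
  · omega
  · exact h

-- B's port equals the first components of A's stably sorted pair list
theorem alt_eq_indices (td : List Int) :
    order_vehicles_py_alt td
      = (PySem.List.sorted (PySem.List.enumerate td 0) (fun x => x.2) false).map (fun p => p.1) := by
  unfold order_vehicles_py_alt
  rw [sorted2_eq_sorted_lex]
  apply PySem.List.sorted_eq_of_perm_of_pairwise_lt
  · have h := ((PySem.List.sorted_perm (PySem.List.enumerate td 0) (fun x => x.2) false).map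
      (fun p : Int × Int => p.1))
    rw [PySem.List.map_fst_enumerate] at h
    simpa using h
  · rw [List.pairwise_map]
    have hlex := sorted_lex_pairwise (fun p : Int × Int => p.2) (fun p => p.1)
        (PySem.List.enumerate td 0) (PySem.List.pairwise_lt_enumerate td 0)
    refine hlex.imp_of_mem ?_
    intro a b ha hb h
    rw [mem_S_getD td a ha, mem_S_getD td b hb]
    exact h

-- each iteration of A's run-fixing loop leaves the index list unchanged
theorem owStep_id (td : List Int) (i : Int) (h0 : 0 ≤ i)
    (h1 : i < (((PySem.List.sorted (PySem.List.enumerate td 0) (fun x => x.2) false).map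
          (fun p => p.2)).length : Int)) :
    owStep ((PySem.List.sorted (PySem.List.enumerate td 0) (fun x => x.2) false).map (fun p => p.2))
        ((PySem.List.sorted (PySem.List.enumerate td 0) (fun x => x.2) false).map (fun p => p.1)) i
      = (PySem.List.sorted (PySem.List.enumerate td 0) (fun x => x.2) false).map (fun p => p.1) := by
  set S := PySem.List.sorted (PySem.List.enumerate td 0) (fun x => x.2) false with hSdef
  set nums := S.map (fun p => p.2) with hnums
  set idcs := S.map (fun p => p.1) with hidcs
  set v := PySem.List.pyGetD nums i 0 with hv
  have hspec := owFindJ_spec nums v (i + 1) (by omega)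
  set j := owFindJ nums v (i + 1) with hj
  have hlen : nums.length = S.length := by rw [hnums]; exact List.length_map ..
  have hlen' : idcs.length = S.length := by rw [hidcs]; exact List.length_map ..
  -- every position m with i ≤ m < j holds value v
  have hrun : ∀ m : Nat, (hm : m < S.length) → i.toNat ≤ m → (m : Int) < j → (S[m]'hm).2 = v := by
    intro m hm hml hmr
    have hget : PySem.List.pyGetD nums (m : Int) 0 = (S[m]'hm).2 := by
      rw [PySem.List.pyGetD_eq_getElem nums 0 (Int.natCast_nonneg m) (by omega)]
      simp only [Int.toNat_natCast, hnums, List.getElem_map]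
    by_cases hmi : (m : Int) = i
    · rw [hv, ← hmi] at *; rw [← hget]
    · exact (hget ▸ hspec.2.2 (m : Int) (by omega) hmr)
  unfold owStep
  rw [← hv, ← hj]
  by_cases hcase : j - i > 1
  · rw [if_pos hcase]
    rw [PySem.List.slice_to idcs h0, PySem.List.slice_from idcs (by omega),
        PySem.List.slice_toNat idcs h0 (by omega)]
    have hmid : PySem.List.sorted (List.take (j.toNat - i.toNat) (List.drop i.toNat idcs))
        (fun x => x) false = List.take (j.toNat - i.toNat) (List.drop i.toNat idcs) := by
      apply PySem.List.sorted_eq_self_of_pairwise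
      rw [List.pairwise_iff_getElem]
      intro p q hp hq hpq
      have hlt : ∀ r : Nat, r < (List.take (j.toNat - i.toNat) (List.drop i.toNat idcs)).length →
          i.toNat + r < S.length ∧ ((i.toNat + r : Nat) : Int) < j := by
        intro r hr
        simp only [List.length_take, List.length_drop, hlen'] at hr
        have hjn : j ≤ (S.length : Int) := by omega
        constructor <;> omega
      have hp' := hlt p (by omega)
      have hq' := hlt q hq
      have e1 : (List.take (j.toNat - i.toNat) (List.drop i.toNat idcs))[p]'hp
          = (S[i.toNat + p]'hp'.1).1 := by
        rw [List.getElem_take, List.getElem_drop]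
        simp only [hidcs, List.getElem_map]
      have e2 : (List.take (j.toNat - i.toNat) (List.drop i.toNat idcs))[q]'hq
          = (S[i.toNat + q]'hq'.1).1 := by
        rw [List.getElem_take, List.getElem_drop]
        simp only [hidcs, List.getElem_map]
      rw [e1, e2]
      refine le_of_lt (S_run_lt td _ _ hp'.1 hq'.1 (by omega) ?_)
      rw [hrun _ hp'.1 (by omega) hp'.2, hrun _ hq'.1 (by omega) hq'.2]
    rw [hmid]
    have hd : List.drop j.toNat idcs = List.drop (j.toNat - i.toNat) (List.drop i.toNat idcs) := by
      rw [List.drop_drop]; congr 1; omega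
    rw [hd, List.append_assoc, List.take_append_drop, List.take_append_drop]
  · rw [if_neg hcase]

-- A's port equals the first components of its stably sorted pair list: the fix-up loop is the identity
theorem A_eq_indices (td : List Int) :
    order_vehicles_py td
      = (PySem.List.sorted (PySem.List.enumerate td 0) (fun x => x.2) false).map (fun p => p.1) := by
  unfold order_vehicles_py
  apply foldl_fix
  intro i hi
  rw [PySem.List.mem_pyRange_one] at hi
  exact owStep_id td i hi.1 hi.2

-- ===== VERDICT (by name: the statement is the Claim_ definition above) =====
theorem order_vehicles_py_spec : Claim_equal_order_vehicles_py := by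
  intro td _
  unfold Spec_order_vehicles_py
  rw [A_eq_indices, alt_eq_indices]
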